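-- pv_equiv track=rewrite | github.com/kevinOrhan/IA_SPORT_HAND | IA_SPORT_ORHAN/hand_tactics2.py | verifier_resultat_global
-- ===== SOURCE A (Python) =====
-- EVENEMENTS_A_VERIFIER_POUR_BUT = ["Penatly Shot"]
--
-- def verifier_resultat_global(timestamp_fin, carte_evenements, type_event_fin):
--     if type_event_fin == "Goal": return True
--     if type_event_fin in EVENEMENTS_A_VERIFIER_POUR_BUT:
--         tous_timestamps = sorted(carte_evenements.keys())
--         try:
--             idx = tous_timestamps.index(timestamp_fin)
--             for i in range(1, 3):
--                 if idx + i >= len(tous_timestamps): break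
--                 evt = carte_evenements[tous_timestamps[idx + i]].get("Event")
--                 if evt == "Goal": return True
--         except ValueError: pass
--     return False
-- ===== SOURCE B (Python) =====
-- EVENEMENTS_A_VERIFIER_POUR_BUT = ["Penatly Shot"]
--
-- def verifier_resultat_global(timestamp_fin, carte_evenements, type_event_fin):
--     if type_event_fin == "Goal":
--         return True
--     if type_event_fin not in EVENEMENTS_A_VERIFIER_POUR_BUT:
--         return False
--     if timestamp_fin not in carte_evenements:
--         return False
--     # one pass: the two smallest timestamps strictly greater than timestamp_fin
--     m1 = None
--     m2 = None
--     for t in carte_evenements: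
--         if timestamp_fin < t:
--             if m1 is None:
--                 m1, m2 = t, None
--             elif t < m1:
--                 m1, m2 = t, m1
--             elif m2 is None or t < m2:
--                 m2 = t
--     for t in (m1, m2):
--         if t is not None and carte_evenements[t].get("Event") == "Goal":
--             return True
--     return False
-- ===== Notes on version B (the rewrite author's own statement) =====
-- stated objective: alternative
-- what changed: Replaces A's full sort of all timestamps plus index lookup by a single pass over the keys that keeps the two smallest timestamps strictly greater than timestamp_fin and then checks their events.
import Mathlib
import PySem

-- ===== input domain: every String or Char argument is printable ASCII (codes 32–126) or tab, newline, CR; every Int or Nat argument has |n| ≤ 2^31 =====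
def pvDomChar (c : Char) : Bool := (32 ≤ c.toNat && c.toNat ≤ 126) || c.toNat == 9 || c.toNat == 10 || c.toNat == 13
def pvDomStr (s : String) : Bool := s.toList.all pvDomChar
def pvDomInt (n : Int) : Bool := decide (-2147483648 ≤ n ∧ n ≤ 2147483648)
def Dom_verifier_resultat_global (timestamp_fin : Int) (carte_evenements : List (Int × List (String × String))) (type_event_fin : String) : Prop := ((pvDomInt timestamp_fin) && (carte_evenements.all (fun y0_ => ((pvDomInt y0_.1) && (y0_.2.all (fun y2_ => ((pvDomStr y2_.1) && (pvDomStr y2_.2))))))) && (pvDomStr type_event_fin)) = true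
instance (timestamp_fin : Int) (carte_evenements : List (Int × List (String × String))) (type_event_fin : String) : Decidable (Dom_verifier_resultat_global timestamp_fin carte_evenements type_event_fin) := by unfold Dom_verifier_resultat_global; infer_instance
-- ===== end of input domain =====

-- B replaces A's full sort of the timestamps by a single pass over the keys keeping the two
-- smallest timestamps greater than timestamp_fin (objective: alternative algorithm).

-- ===== PORT A =====
def EVENEMENTS_A_VERIFIER_POUR_BUT : List String := ["Penatly Shot"]

-- 'for i in range(1, 3): if idx + i >= len(tous): break; … if evt == "Goal": return True'
def pvABoucle (d : PySem.Dict Int (List (String × String))) (tous : List Int) (idx : Nat) : List Int → Bool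
  | [] => false
  | i :: rest =>
    if (idx : Int) + i ≥ PySem.List.len tous then false
    else
      -- carte_evenements[tous[idx+i]] cannot raise KeyError (the key comes from keys()): getD [] is exact here
      let evt := (PySem.Dict.ofList (d.getD (PySem.List.pyGetD tous ((idx : Int) + i) 0) [])).get? "Event"
      if evt == some "Goal" then true else pvABoucle d tous idx rest

def verifier_resultat_global (timestamp_fin : Int) (carte_evenements : List (Int × List (String × String))) (type_event_fin : String) : Bool :=
  if type_event_fin == "Goal" then true
  else if EVENEMENTS_A_VERIFIER_POUR_BUT.contains type_event_fin then
    let d := PySem.Dict.ofList carte_evenements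
    let tous_timestamps := PySem.List.sorted d.keys (fun x => x) false
    match PySem.List.index? tous_timestamps timestamp_fin with
    | some idx => pvABoucle d tous_timestamps idx (PySem.List.pyRange 1 3 1)
    | none => false
  else false

-- ===== PORT B =====
-- one update of the running pair (m1, m2) = two smallest timestamps > timestamp_fin seen so far
def pvBMaj (timestamp_fin : Int) (acc : Option Int × Option Int) (t : Int) : Option Int × Option Int :=
  if timestamp_fin < t then
    match acc with
    | (none, _) => (some t, none)
    | (some a, none) => if t < a then (some t, some a) else (some a, some t)
    | (some a, some b) =>
      if t < a then (some t, some a)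
      else if t < b then (some a, some t) else (some a, some b)
  else acc

def pvBCheck (d : PySem.Dict Int (List (String × String))) : Option Int → Bool
  | none => false
  | some t => (PySem.Dict.ofList (d.getD t [])).get? "Event" == some "Goal"

def verifier_resultat_global_alt (timestamp_fin : Int) (carte_evenements : List (Int × List (String × String))) (type_event_fin : String) : Bool :=
  if type_event_fin == "Goal" then true
  else if !(EVENEMENTS_A_VERIFIER_POUR_BUT.contains type_event_fin) then false
  else
    let d := PySem.Dict.ofList carte_evenements
    if !(d.contains timestamp_fin) then false
    else
      let mm := d.keys.foldl (pvBMaj timestamp_fin) (none, none)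
      pvBCheck d mm.1 || pvBCheck d mm.2

-- ===== PRECONDITION & SPEC =====
def Spec_verifier_resultat_global (timestamp_fin : Int) (carte_evenements : List (Int × List (String × String))) (type_event_fin : String) (out : Bool) : Prop := out = verifier_resultat_global_alt timestamp_fin carte_evenements type_event_fin
instance (timestamp_fin : Int) (carte_evenements : List (Int × List (String × String))) (type_event_fin : String) (out : Bool) : Decidable (Spec_verifier_resultat_global timestamp_fin carte_evenements type_event_fin out) := by unfold Spec_verifier_resultat_global; infer_instance

-- ===== CLAIM (what is proved, stated in full; the proofs are below) =====
def Claim_equal_verifier_resultat_global : Prop := ∀ (timestamp_fin : Int) (carte_evenements : List (Int × List (String × String))) (type_event_fin : String), Dom_verifier_resultat_global timestamp_fin carte_evenements type_event_fin → Spec_verifier_resultat_global timestamp_fin carte_evenements type_event_fin (verifier_resultat_global timestamp_fin carte_evenements type_event_fin)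

-- ===== LEMMAS AND PROOFS =====

-- the unguarded body of pvBMaj
def pvIns (acc : Option Int × Option Int) (t : Int) : Option Int × Option Int :=
  match acc with
  | (none, _) => (some t, none)
  | (some a, none) => if t < a then (some t, some a) else (some a, some t)
  | (some a, some b) =>
    if t < a then (some t, some a)
    else if t < b then (some a, some t) else (some a, some b)

theorem pvBMaj_eq (x : Int) (acc : Option Int × Option Int) (t : Int) :
    pvBMaj x acc t = if decide (x < t) = true then pvIns acc t else acc := by
  simp [pvBMaj, pvIns]

theorem pvIns_insertBy (s : List Int) (t : Int) :
    pvIns (s[0]?, s[1]?) t =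
      ((PySem.List.insertBy (fun a b => decide (a < b)) t s)[0]?,
       (PySem.List.insertBy (fun a b => decide (a < b)) t s)[1]?) := by
  match s with
  | [] => simp [pvIns, PySem.List.insertBy]
  | [a] =>
    by_cases h : t < a <;> simp [pvIns, PySem.List.insertBy, h]
  | a :: b :: rest =>
    by_cases h1 : t < a
    · simp [pvIns, PySem.List.insertBy, h1]
    · by_cases h2 : t < b <;> simp [pvIns, PySem.List.insertBy, h1, h2]

theorem pvFoldl_pvIns (fl : List Int) : ∀ s : List Int,
    fl.foldl pvIns (s[0]?, s[1]?) =
      ((fl.foldl (fun acc x => PySem.List.insertBy (fun a b => decide (a < b)) x acc) s)[0]?,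
       (fl.foldl (fun acc x => PySem.List.insertBy (fun a b => decide (a < b)) x acc) s)[1]?) := by
  induction fl with
  | nil => intro s; simp
  | cons t fl ih =>
    intro s
    simp only [List.foldl_cons, pvIns_insertBy]
    exact ih _

-- B's fold computes the first two elements of sorted([t for t in keys if t > x])
theorem pvFold_eq_sorted (x : Int) (l : List Int) :
    l.foldl (pvBMaj x) (none, none) =
      ((PySem.List.sorted (l.filter (fun t => decide (x < t))) (fun y => y) false)[0]?,
       (PySem.List.sorted (l.filter (fun t => decide (x < t))) (fun y => y) false)[1]?) := by
  have h1 : l.foldl (pvBMaj x) (none, none)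
      = (l.filter (fun t => decide (x < t))).foldl pvIns (none, none) := by
    rw [List.foldl_filter]
    congr 1
    funext acc t
    rw [pvBMaj_eq]
  rw [h1, PySem.List.sorted_eq_foldl_insertBy]
  have := pvFoldl_pvIns (l.filter (fun t => decide (x < t))) []
  simpa using this

-- in a strictly increasing list, the elements greater than s[idx] are exactly those after idx
theorem pvFilter_eq_drop (s : List Int) (hlt : s.Pairwise (· < ·)) (idx : Nat) (hk : idx < s.length)
    (x : Int) (hx : x = s[idx]'hk) :
    s.filter (fun t => decide (x < t)) = s.drop (idx + 1) := by
  have hget := List.pairwise_iff_getElem.mp hlt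
  conv_lhs => rw [← List.take_append_drop (idx + 1) s]
  rw [List.filter_append]
  have htake : (s.take (idx + 1)).filter (fun t => decide (x < t)) = [] := by
    rw [List.filter_eq_nil_iff]
    intro y hy
    obtain ⟨j, hj, hjy⟩ := List.mem_take_iff_getElem.mp hy
    have hj' : j < s.length := lt_of_lt_of_le hj (by simp)
    have hjle : s[j]'hj' ≤ s[idx] := by
      rcases Nat.lt_or_ge j idx with h | h
      · exact le_of_lt (hget j idx hj' hk h)
      · have : j = idx := by omega
        subst this; exact le_refl _
    subst hjy hx
    simp [not_lt.mpr hjle]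
  have hdrop : (s.drop (idx + 1)).filter (fun t => decide (x < t)) = s.drop (idx + 1) := by
    rw [List.filter_eq_self]
    intro y hy
    obtain ⟨j, hj, hjy⟩ := List.getElem_of_mem (l := s.drop (idx + 1)) hy
    have hj2 : idx + 1 + j < s.length := by rw [List.length_drop] at hj; omega
    rw [List.getElem_drop] at hjy
    have hlt2 : s[idx] < s[idx + 1 + j]'hj2 := hget idx (idx + 1 + j) hk hj2 (by omega)
    rw [hjy] at hlt2
    subst hx
    simp [hlt2]
  rw [htake, hdrop, List.nil_append]

-- ===== VERDICT (by name: the statement is the Claim_ definition above) =====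
theorem verifier_resultat_global_spec : Claim_equal_verifier_resultat_global := by
  intro tf carte te _
  unfold Spec_verifier_resultat_global verifier_resultat_global verifier_resultat_global_alt
  by_cases hgoal : te == "Goal"
  · simp only [hgoal, if_true]
  · simp only [hgoal, Bool.false_eq_true, if_false]
    by_cases hev : EVENEMENTS_A_VERIFIER_POUR_BUT.contains te = true
    · simp only [hev, Bool.not_true, Bool.false_eq_true, if_false, if_true]
      set d := PySem.Dict.ofList carte with hd
      set s := PySem.List.sorted d.keys (fun x => x) false with hs
      have hnd : d.keys.Nodup := PySem.Dict.nodup_keys_ofList carte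
      have hsnd : s.Nodup := (PySem.List.sorted_perm d.keys (fun x => x) false).symm.nodup hnd
      have hle : s.Pairwise (· ≤ ·) := PySem.List.sorted_pairwise d.keys (fun x => x)
      have hlt : s.Pairwise (· < ·) := by
        have := List.Pairwise.and hle hsnd
        exact this.imp (fun h => lt_of_le_of_ne h.1 h.2)
      cases hidx : PySem.List.index? s tf with
      | none =>
        have hmem : tf ∉ d.keys := by
          have := (PySem.List.index?_eq_none_iff s tf).mp hidx
          rwa [hs, PySem.List.mem_sorted] at this
        have hcont : d.contains tf = false := by
          rcases Bool.eq_false_or_eq_true (d.contains tf) with h | h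
          · exact absurd ((PySem.Dict.contains_iff_mem_keys d tf).mp h) hmem
          · exact h
        simp [hcont]
      | some idx =>
        obtain ⟨hk, hval, _⟩ := PySem.List.getElem_of_index?_eq_some hidx
        have hmem : tf ∈ d.keys := by
          rw [← PySem.List.mem_sorted d.keys (fun x => x) false, ← hs, ← hval]
          exact List.getElem_mem hk
        have hcont : d.contains tf = true := (PySem.Dict.contains_iff_mem_keys d tf).mpr hmem
        simp only [hcont, Bool.not_true, Bool.false_eq_true, if_false]
        -- B's pair = first two of drop (idx+1) s
        have hmm : d.keys.foldl (pvBMaj tf) (none, none) = ((s.drop (idx + 1))[0]?, (s.drop (idx + 1))[1]?) := by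
          rw [pvFold_eq_sorted]
          have hdropeq : PySem.List.sorted (d.keys.filter (fun t => decide (tf < t))) (fun y => y) false = s.drop (idx + 1) := by
            apply PySem.List.sorted_eq_of_perm_of_pairwise_lt
            · rw [← pvFilter_eq_drop s hlt idx hk tf hval.symm]
              exact (PySem.List.sorted_perm d.keys (fun x => x) false).filter _
            · exact hlt.drop
          rw [hdropeq]
        rw [hmm]
        -- A's loop over [1, 2] versus B's two checks
        have hrange : PySem.List.pyRange 1 3 1 = [1, 2] := by decide
        rw [hrange]
        have hlen : PySem.List.len s = (s.length : Int) := by simp [PySem.List.len_eq]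
        by_cases h1 : idx + 1 < s.length
        · have hg1 : (s.drop (idx + 1))[0]? = some (s[idx + 1]'h1) := by
            rw [List.getElem?_drop]
            simp [List.getElem?_eq_getElem (by omega : idx + 1 + 0 < s.length)]
          have hguard1 : ¬ ((idx : Int) + 1 ≥ PySem.List.len s) := by
            rw [hlen]; omega
          have hget1 : PySem.List.pyGetD s ((idx : Int) + 1) 0 = s[idx + 1]'h1 := by
            have : ((idx : Int) + 1) = ((idx + 1 : Nat) : Int) := by push_cast; ring
            rw [this, PySem.List.pyGetD_natCast, List.getD_eq_getElem _ _ h1]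
          simp only [pvABoucle, hguard1, if_false, hget1, hg1, pvBCheck]
          by_cases hc1 : ((PySem.Dict.ofList (d.getD (s[idx + 1]'h1) [])).get? "Event" == some "Goal") = true
          · simp [hc1]
          · simp only [Bool.not_eq_true] at hc1
            simp only [hc1, Bool.false_eq_true, if_false, Bool.false_or]
            by_cases h2 : idx + 2 < s.length
            · have hg2 : (s.drop (idx + 1))[1]? = some (s[idx + 2]'h2) := by
                rw [List.getElem?_drop]
                simp [List.getElem?_eq_getElem (by omega : idx + 1 + 1 < s.length)]
              have hguard2 : ¬ ((idx : Int) + 2 ≥ PySem.List.len s) := by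
                rw [hlen]; omega
              have hget2 : PySem.List.pyGetD s ((idx : Int) + 2) 0 = s[idx + 2]'h2 := by
                have : ((idx : Int) + 2) = ((idx + 2 : Nat) : Int) := by push_cast; ring
                rw [this, PySem.List.pyGetD_natCast, List.getD_eq_getElem _ _ h2]
              simp only [hguard2, if_false, hget2, hg2]
              split <;> simp_all
            · have hg2 : (s.drop (idx + 1))[1]? = none := by
                rw [List.getElem?_drop]
                apply List.getElem?_eq_none
                omega
              have hguard2 : ((idx : Int) + 2 ≥ PySem.List.len s) := by
                rw [hlen]; omega
              simp only [hguard2, if_true, hg2]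
        · have hg1 : (s.drop (idx + 1))[0]? = none := by
            rw [List.getElem?_drop]
            apply List.getElem?_eq_none
            omega
          have hg2 : (s.drop (idx + 1))[1]? = none := by
            rw [List.getElem?_drop]
            apply List.getElem?_eq_none
            omega
          have hguard1 : ((idx : Int) + 1 ≥ PySem.List.len s) := by
            rw [hlen]; omega
          simp only [pvABoucle, hguard1, if_true, hg1, hg2, pvBCheck]
          simp
    · have hmem : te ∉ EVENEMENTS_A_VERIFIER_POUR_BUT := fun h => hev (List.contains_iff_mem.mpr h)
      simp [hmem]
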